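-- pv_equiv track=rewrite | github.com/ssorry123/ProblemSolving | 00_programmers/숫자게임.py | solution
-- ===== SOURCE A (Python) =====
-- def solution(A, B):
--     answer = 0
--     N = len(A)  # A==B
--     '''
--     진다고 승점을 잃는 것은 아니다
--     B 팀은 A팀의 카드와 순서를 알고 있다
--     한번 이길때마다 승점 1점씩 얻는다
--     한번 이길때 가장 작은 차이가 나는 수로 이기는게 좋겠다
--     즉, 각 게임마다 가장 적은 비용으로 이기는 것,,
--     '''
--     # 각 A의 원소에 대해서, 어떻게 B원소들을 매칭시킬까
--
--     A, a_idx = sorted(A), 0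
--     B, b_idx = sorted(B), 0
--
--     # b_idx >= a_idx 상태를 항상 유지한다
--     while b_idx < N:
--         # 현재 b_idx로 a_idx를 이길 수 있는가?
--         if A[a_idx] < B[b_idx]:
--             answer += 1 # 승점 추가
--             a_idx += 1
--             b_idx += 1
--         # 이길 수 없다, 더큰 수로 이겨보자
--         else:
--             b_idx += 1
--
--
--     return answer
-- ===== SOURCE B (Python) =====
-- def solution(A, B):
--     # Counting instead of matching (Hall-type argument): over the n rounds the
--     # ascending pool of cards in play, the number of winnable rounds equals
--     # n minus the largest "deficiency" -- for any threshold, pool cards at or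
--     # below it minus A cards strictly below it.  One ascending sweep with a
--     # running count computes that maximum; no cards are ever paired.
--     n = len(A)
--     sa = sorted(A)
--     pool = sorted(B)[:n]
--     i = j = best = 0
--     for y in pool:
--         while i < n and sa[i] < y:
--             i += 1
--         j += 1
--         if j - i > best:
--             best = j - i
--     return n - best
-- ===== Notes on version B (the rewrite author's own statement) =====
-- stated objective: alternative
-- what changed: Replaces A's greedy pairing of cards by a Hall-type counting sweep: B never matches any cards, it computes the maximum threshold deficiency (pool cards at or below a threshold minus A cards strictly below it) in one ascending pass and returns n minus that maximum.
import Mathlib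
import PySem

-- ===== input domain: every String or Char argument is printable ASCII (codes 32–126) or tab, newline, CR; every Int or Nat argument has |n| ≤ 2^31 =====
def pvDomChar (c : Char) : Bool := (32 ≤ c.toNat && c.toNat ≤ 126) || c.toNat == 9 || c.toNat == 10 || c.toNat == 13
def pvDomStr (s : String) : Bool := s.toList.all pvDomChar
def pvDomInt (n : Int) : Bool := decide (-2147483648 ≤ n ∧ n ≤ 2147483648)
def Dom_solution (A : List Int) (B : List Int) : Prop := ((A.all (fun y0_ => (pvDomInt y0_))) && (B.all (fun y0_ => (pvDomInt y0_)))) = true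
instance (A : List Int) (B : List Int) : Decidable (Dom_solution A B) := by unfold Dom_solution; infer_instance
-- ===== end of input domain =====

-- B replaces A's greedy pairing of cards by a Hall-type counting sweep that
-- pairs nothing (objective: alternative algorithm, same cost).

-- ===== PORT A =====
-- the `while b_idx < N` loop of A; fuel only makes the recursion total
-- (N.toNat steps suffice: b_idx increases every iteration); A[a_idx]/B[b_idx]
-- via pyGetD, in range on every input Pre_solution admits
def loopA (sa sb : List Int) (N : Int) : Nat → Int → Int → Int → Int
  | 0, _, _, ans => ans
  | fuel + 1, a, b, ans =>
    if b < N then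
      if PySem.List.pyGetD sa a 0 < PySem.List.pyGetD sb b 0 then
        loopA sa sb N fuel (a + 1) (b + 1) (ans + 1)
      else
        loopA sa sb N fuel a (b + 1) ans
    else ans

def solution (A : List Int) (B : List Int) : Int :=
  let N : Int := A.length
  let sa := PySem.List.sorted A (fun x => x) false
  let sb := PySem.List.sorted B (fun x => x) false
  loopA sa sb N N.toNat 0 0 0

-- ===== PORT B =====
-- the `while i < n and sa[i] < y` loop of Source B; fuel (n - i).toNat makes it total
def advB (sa : List Int) (n y : Int) : Nat → Int → Int
  | 0, i => i
  | fuel + 1, i =>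
    if i < n ∧ PySem.List.pyGetD sa i 0 < y then advB sa n y fuel (i + 1) else i

-- the body of Source B's `for y in pool` loop; state (i, j, best)
def stepB (sa : List Int) (n : Int) (s : Int × Int × Int) (y : Int) : Int × Int × Int :=
  let i := advB sa n y (n - s.1).toNat s.1
  let j := s.2.1 + 1
  let best := if j - i > s.2.2 then j - i else s.2.2
  (i, j, best)

def solution_alt (A : List Int) (B : List Int) : Int :=
  -- sorted(B)[:n] with n = len(A) ≥ 0 is .take (PySem.List.slice_to_natCast)
  let n : Int := A.length
  let sa := PySem.List.sorted A (fun x => x) false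
  let pool := (PySem.List.sorted B (fun x => x) false).take A.length
  let st := pool.foldl (stepB sa n) (0, 0, 0)
  n - st.2.2

-- ===== PRECONDITION & SPEC =====
-- Pre_ excludes exactly len(B) < len(A), where A's loop indexes sorted(B) out of range (IndexError).
def Pre_solution (A : List Int) (B : List Int) : Prop := A.length ≤ B.length
instance (A : List Int) (B : List Int) : Decidable (Pre_solution A B) := by unfold Pre_solution; infer_instance
def pvWitness_solution : List Int × List Int := ([3, 1, 2], [4, 2, 3])

def Spec_solution (A : List Int) (B : List Int) (out : Int) : Prop := out = solution_alt A B
instance (A : List Int) (B : List Int) (out : Int) : Decidable (Spec_solution A B out) := by unfold Spec_solution; infer_instance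

-- ===== CLAIM (what is proved, stated in full; the proofs are below) =====
def Claim_equal_solution : Prop := ∀ (A : List Int) (B : List Int), Dom_solution A B → Pre_solution A B → Spec_solution A B (solution A B)

-- ===== LEMMAS AND PROOFS =====

-- the list form of A's smallest-first greedy loop
def fAsc : List Int → List Int → Int
  | _, [] => 0
  | [], _ :: _ => 0
  | x :: la, y :: lb => if x < y then 1 + fAsc la lb else fAsc (x :: la) lb
termination_by _ lb => lb.length

theorem fAsc_nil_right (xs : List Int) : fAsc xs [] = 0 := by
  cases xs <;> simp [fAsc]

theorem fAsc_nil_left (lb : List Int) : fAsc [] lb = 0 := by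
  cases lb <;> simp [fAsc]

theorem fAsc_cons_cons (x y : Int) (la lb : List Int) :
    fAsc (x :: la) (y :: lb) = if x < y then 1 + fAsc la lb else fAsc (x :: la) lb := by
  simp [fAsc]

-- number of elements of X strictly below y
def cntLt (X : List Int) (y : Int) : Nat := X.countP (fun x => decide (x < y))

-- the deficiency terms of Y against X: k-th term = (k+1) - #{x ∈ X | x < Y[k]}
def terms (X : List Int) : List Int → List Int
  | [] => []
  | y :: ys => ((1 : Int) - (cntLt X y : Int)) :: (terms X ys).map (· + 1)

-- maximum deficiency, clamped at 0
def Dd (X Y : List Int) : Int := (terms X Y).foldr max 0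

theorem cnt_mono (X : List Int) {y y' : Int} (h : y ≤ y') : cntLt X y ≤ cntLt X y' := by
  exact List.countP_mono_left (fun x _ hx => by
    simp only [decide_eq_true_eq] at *; omega)

theorem cnt_le_length (X : List Int) (y : Int) : cntLt X y ≤ X.length :=
  List.countP_le_length

theorem cnt_cons_of_lt {x y : Int} (xs : List Int) (h : x < y) :
    cntLt (x :: xs) y = cntLt xs y + 1 := by
  simp [cntLt, h]

theorem cnt_eq_zero {X : List Int} {y : Int} (h : ∀ z ∈ X, ¬ z < y) : cntLt X y = 0 := by
  simp only [cntLt, List.countP_eq_zero, decide_eq_true_eq]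
  exact h

theorem foldr_max_init (l : List Int) (a b : Int) :
    l.foldr max (max a b) = max a (l.foldr max b) := by
  induction l with
  | nil => rfl
  | cons x l ih => simp only [List.foldr, ih]; omega

theorem max0_nonneg (l : List Int) : 0 ≤ l.foldr max 0 := by
  induction l with
  | nil => simp
  | cons x l ih => simp only [List.foldr]; omega

theorem foldr_max_shift (l : List Int) :
    max 1 ((l.map (· + 1)).foldr max 0) = 1 + l.foldr max 0 := by
  induction l with
  | nil => simp
  | cons a l ih => simp only [List.map, List.foldr] at *; omega

theorem Dd_skip {X : List Int} {y : Int} (ys : List Int) (h : cntLt X y = 0) :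
    Dd X (y :: ys) = 1 + Dd X ys := by
  simp only [Dd, terms, h, Nat.cast_zero, sub_zero, List.foldr]
  exact foldr_max_shift (terms X ys)

theorem terms_shift {x y : Int} (xs : List Int) :
    ∀ ys : List Int, (∀ z ∈ ys, y ≤ z) → x < y →
      terms (x :: xs) ys = (terms xs ys).map (· - 1) := by
  intro ys
  induction ys with
  | nil => intro _ _; rfl
  | cons z zs ih =>
    intro hall hxy
    have hxz : x < z := lt_of_lt_of_le hxy (hall z (by simp))
    have hrec := ih (fun w hw => hall w (by simp [hw])) hxy
    simp only [terms, cnt_cons_of_lt xs hxz, hrec, List.map_cons, List.map_map]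
    congr 1
    · push_cast; ring
    · apply List.map_congr_left; intro a _; simp

theorem Dd_hit {x y : Int} (xs ys : List Int) (hxy : x < y) (hall : ∀ z ∈ ys, y ≤ z) :
    Dd (x :: xs) (y :: ys) = Dd xs ys := by
  have h0 : ((1 : Int) - (cntLt (x :: xs) y : Int)) ≤ 0 := by
    have := cnt_cons_of_lt xs hxy; omega
  simp only [Dd, terms, terms_shift xs ys hall hxy, List.map_map, List.foldr]
  have hid : ((terms xs ys).map ((· + 1) ∘ (· - 1))).foldr max 0
      = (terms xs ys).foldr max 0 := by
    congr 1
    rw [show ((· + 1) ∘ (· - 1) : Int → Int) = id by funext a; simp]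
    exact List.map_id _
  rw [hid]
  have := max0_nonneg (terms xs ys)
  omega

-- the central identity: greedy wins = |Y| - max deficiency, on sorted lists
theorem fAsc_eq_Dd :
    ∀ (Y X : List Int), X.Pairwise (· ≤ ·) → Y.Pairwise (· ≤ ·) →
      fAsc X Y = (Y.length : Int) - Dd X Y := by
  intro Y
  induction Y with
  | nil => intro X _ _; simp [fAsc_nil_right, Dd, terms]
  | cons y ys ih =>
    intro X hX hY
    have hYtail : ys.Pairwise (· ≤ ·) := (List.pairwise_cons.mp hY).2
    have hYhead : ∀ z ∈ ys, y ≤ z := (List.pairwise_cons.mp hY).1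
    cases X with
    | nil =>
      have h0 : cntLt ([] : List Int) y = 0 := by simp [cntLt]
      rw [fAsc_nil_left, Dd_skip ys h0]
      have := ih [] (by simp) hYtail
      rw [fAsc_nil_left] at this
      simp only [List.length_cons]
      push_cast
      omega
    | cons x xs =>
      have hXtail : xs.Pairwise (· ≤ ·) := (List.pairwise_cons.mp hX).2
      have hXhead : ∀ z ∈ xs, x ≤ z := (List.pairwise_cons.mp hX).1
      by_cases hxy : x < y
      · rw [fAsc_cons_cons, if_pos hxy, Dd_hit xs ys hxy hYhead,
            ih xs hXtail hYtail]
        simp only [List.length_cons]; push_cast; ring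
      · have h0 : cntLt (x :: xs) y = 0 := by
          apply cnt_eq_zero
          intro z hz
          rcases List.mem_cons.mp hz with h | h
          · omega
          · have := hXhead z h; omega
        rw [fAsc_cons_cons, if_neg hxy, Dd_skip ys h0, ih (x :: xs) hX hYtail]
        simp only [List.length_cons]; push_cast; ring

-- sorted lists: an element below y forces the count past its index …
theorem cnt_ge_of_getElem_lt {sa : List Int} (hsa : sa.Pairwise (· ≤ ·)) {y : Int}
    {k : Nat} (hk : k < sa.length) (h : sa[k] < y) : k + 1 ≤ cntLt sa y := by
  have hsplit : cntLt sa y = cntLt (sa.take (k + 1)) y + cntLt (sa.drop (k + 1)) y := by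
    unfold cntLt; rw [← List.countP_append, List.take_append_drop]
  have htake : cntLt (sa.take (k + 1)) y = (sa.take (k + 1)).length := by
    apply List.countP_eq_length.mpr
    intro a ha
    rcases List.mem_iff_getElem.mp ha with ⟨j, hj, rfl⟩
    have hj' : j < sa.length := lt_of_lt_of_le hj (by simp [List.length_take])
    rw [List.getElem_take]
    have hjk : j ≤ k := by simp [List.length_take] at hj; omega
    have : sa[j] ≤ sa[k] := by
      rcases Nat.lt_or_ge j k with hlt | hge
      · exact List.pairwise_iff_getElem.mp hsa j k hj' hk hlt
      · have : j = k := by omega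
        subst this; exact le_refl _
    simp only [decide_eq_true_eq]; omega
  have hlen : (sa.take (k + 1)).length = k + 1 := by simp [List.length_take]; omega
  omega

-- … and an element at or above y caps it at its index
theorem cnt_le_of_getElem_ge {sa : List Int} (hsa : sa.Pairwise (· ≤ ·)) {y : Int}
    {k : Nat} (hk : k < sa.length) (h : y ≤ sa[k]) : cntLt sa y ≤ k := by
  have hsplit : cntLt sa y = cntLt (sa.take k) y + cntLt (sa.drop k) y := by
    unfold cntLt; rw [← List.countP_append, List.take_append_drop]
  have hdrop : cntLt (sa.drop k) y = 0 := by
    apply cnt_eq_zero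
    intro z hz
    rcases List.mem_iff_getElem.mp hz with ⟨j, hj, rfl⟩
    rw [List.getElem_drop]
    have hkj : k + j < sa.length := by simp at hj; omega
    have : sa[k] ≤ sa[k + j] := by
      rcases Nat.eq_or_lt_of_le (Nat.le_add_right k j) with he | hlt
      · simp [← he]
      · exact List.pairwise_iff_getElem.mp hsa k (k + j) hk hkj hlt
    omega
  have := cnt_le_length (sa.take k) y
  have : (sa.take k).length ≤ k := by simp [List.length_take]
  omega

-- Source B's inner while loop lands exactly on cntLt sa y
theorem advB_eq {sa : List Int} {n : Int} (hn : n = (sa.length : Int))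
    (hsa : sa.Pairwise (· ≤ ·)) (y : Int) :
    ∀ (fuel : Nat) (i : Int), 0 ≤ i → i ≤ (cntLt sa y : Int) → (n - i).toNat ≤ fuel →
      advB sa n y fuel i = (cntLt sa y : Int) := by
  intro fuel
  induction fuel with
  | zero =>
    intro i hi hcnt hf
    have := cnt_le_length sa y
    simp only [advB]
    omega
  | succ f ihf =>
    intro i hi hcnt hf
    by_cases hcond : i < n ∧ PySem.List.pyGetD sa i 0 < y
    · obtain ⟨hin, hlt⟩ := hcond
      have hiN : i.toNat < sa.length := by omega
      have e1 : PySem.List.pyGetD sa i 0 = sa[i.toNat] :=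
        PySem.List.pyGetD_eq_getElem sa 0 hi (by omega)
      have hlt' : sa[i.toNat] < y := by rw [← e1]; exact hlt
      have hge := cnt_ge_of_getElem_lt hsa hiN hlt'
      rw [show advB sa n y (f + 1) i
            = (if i < n ∧ PySem.List.pyGetD sa i 0 < y then advB sa n y f (i + 1) else i)
          from rfl,
          if_pos (⟨hin, hlt⟩ : i < n ∧ PySem.List.pyGetD sa i 0 < y)]
      exact ihf (i + 1) (by omega) (by omega) (by omega)
    · simp only [advB, if_neg hcond]
      rcases not_and_or.mp hcond with hin | hge
      · have := cnt_le_length sa y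
        omega
      · have hin : i < n ∨ ¬ i < n := em _
        rcases hin with hin | hin
        · have hiN : i.toNat < sa.length := by omega
          have e1 : PySem.List.pyGetD sa i 0 = sa[i.toNat] :=
            PySem.List.pyGetD_eq_getElem sa 0 hi (by omega)
          rw [e1] at hge
          have hge' : y ≤ sa[i.toNat] := by omega
          have := cnt_le_of_getElem_ge hsa hiN hge'
          omega
        · have := cnt_le_length sa y
          omega

-- Source B's sweep over the pool accumulates exactly the deficiency maximum
theorem foldB_eq {sa : List Int} {n : Int} (hn : n = (sa.length : Int))
    (hsa : sa.Pairwise (· ≤ ·)) :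
    ∀ (P : List Int), P.Pairwise (· ≤ ·) → ∀ (i j best : Int),
      0 ≤ i → (∀ y ∈ P, i ≤ (cntLt sa y : Int)) →
      (P.foldl (stepB sa n) (i, j, best)).2.2
        = ((terms sa P).map (· + j)).foldr max best := by
  intro P
  induction P with
  | nil => intro _ i j best _ _; simp [terms]
  | cons y ys ih =>
    intro hP i j best hi hcnt
    have hhead : i ≤ (cntLt sa y : Int) := hcnt y (by simp)
    have hYhead : ∀ z ∈ ys, y ≤ z := (List.pairwise_cons.mp hP).1
    have harr : (if j + 1 - (cntLt sa y : Int) > best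
          then j + 1 - (cntLt sa y : Int) else best)
        = max best (j + 1 - (cntLt sa y : Int)) := by omega
    have hstep : stepB sa n (i, j, best) y
        = ((cntLt sa y : Int), j + 1,
            max best (j + 1 - (cntLt sa y : Int))) := by
      simp only [stepB, advB_eq hn hsa y _ i hi hhead le_rfl, harr]
    rw [List.foldl_cons, hstep,
        ih ((List.pairwise_cons.mp hP).2) ((cntLt sa y : Int)) (j + 1)
          (max best (j + 1 - (cntLt sa y : Int))) (by positivity)
          (fun z hz => by
            have h1 : cntLt sa y ≤ cntLt sa z := cnt_mono sa (hYhead z hz)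
            omega)]
    simp only [terms, List.map_cons, List.map_map, List.foldr]
    have hfun : ((· + j) ∘ (· + 1) : Int → Int) = (· + (j + 1)) := by
      funext a; simp; ring
    rw [hfun, show max best (j + 1 - (cntLt sa y : Int))
          = max (j + 1 - (cntLt sa y : Int)) best by omega,
        foldr_max_init]
    congr 1
    omega

-- A's loop computes the greedy over the drop-suffixes
theorem loopA_eq (sa sb : List Int) (N : Int) (hN : N = sa.length) (hNb : N ≤ sb.length) :
    ∀ (fuel : Nat) (a b ans : Int), (N - b).toNat ≤ fuel → 0 ≤ a → a ≤ b → b ≤ N →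
      loopA sa sb N fuel a b ans = ans + fAsc (sa.drop a.toNat) ((sb.take N.toNat).drop b.toNat) := by
  intro fuel
  induction fuel with
  | zero =>
    intro a b ans hf _ _ hbN
    have hb : b = N := by omega
    have hnil : (sb.take N.toNat).drop b.toNat = [] := by
      apply List.drop_eq_nil_of_le
      simp [List.length_take]
      omega
    simp [loopA, hnil, fAsc_nil_right]
  | succ f ihf =>
    intro a b ans hf ha hab hbN
    by_cases hb : b < N
    · have haL : a.toNat < sa.length := by omega
      have hbL : b.toNat < sb.length := by omega
      have hbT : b.toNat < (sb.take N.toNat).length := by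
        simp [List.length_take]; omega
      have e1 : PySem.List.pyGetD sa a 0 = sa[a.toNat] :=
        PySem.List.pyGetD_eq_getElem sa 0 ha (by omega)
      have e2 : PySem.List.pyGetD sb b 0 = sb[b.toNat] :=
        PySem.List.pyGetD_eq_getElem sb 0 (by omega) (by omega)
      have d1 : sa.drop a.toNat = sa[a.toNat] :: sa.drop (a.toNat + 1) :=
        List.drop_eq_getElem_cons haL
      have d2 : (sb.take N.toNat).drop b.toNat
          = sb[b.toNat] :: (sb.take N.toNat).drop (b.toNat + 1) := by
        rw [List.drop_eq_getElem_cons hbT]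
        congr 1
        simp [List.getElem_take]
      have ea : (a + 1).toNat = a.toNat + 1 := by omega
      have eb : (b + 1).toNat = b.toNat + 1 := by omega
      rw [show loopA sa sb N (f + 1) a b ans
            = if b < N then
                (if PySem.List.pyGetD sa a 0 < PySem.List.pyGetD sb b 0 then
                  loopA sa sb N f (a + 1) (b + 1) (ans + 1)
                else loopA sa sb N f a (b + 1) ans)
              else ans from rfl,
          if_pos hb, e1, e2, d1, d2, fAsc_cons_cons]
      by_cases hcmp : sa[a.toNat] < sb[b.toNat]
      · rw [if_pos hcmp, if_pos hcmp,
            ihf (a + 1) (b + 1) (ans + 1) (by omega) (by omega) (by omega) (by omega),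
            ea, eb]
        ring
      · rw [if_neg hcmp, if_neg hcmp,
            ihf a (b + 1) ans (by omega) ha (by omega) (by omega),
            eb, ← d1]
    · have hnil : (sb.take N.toNat).drop b.toNat = [] := by
        apply List.drop_eq_nil_of_le
        simp [List.length_take]
        omega
      rw [show loopA sa sb N (f + 1) a b ans
            = if b < N then
                (if PySem.List.pyGetD sa a 0 < PySem.List.pyGetD sb b 0 then
                  loopA sa sb N f (a + 1) (b + 1) (ans + 1)
                else loopA sa sb N f a (b + 1) ans)
              else ans from rfl,
          if_neg hb, hnil, fAsc_nil_right]
      ring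

-- ===== VERDICT (by name: the statement is the Claim_ definition above) =====
theorem solution_spec : Claim_equal_solution := by
  intro A B _ hpre
  unfold Pre_solution at hpre
  unfold Spec_solution solution solution_alt
  set sa := PySem.List.sorted A (fun x => x) false with hsa
  set sb := PySem.List.sorted B (fun x => x) false with hsb
  have hlsa : sa.length = A.length := PySem.List.length_sorted A _ false
  have hlsb : sb.length = B.length := PySem.List.length_sorted B _ false
  have hsaP : sa.Pairwise (· ≤ ·) :=
    (PySem.List.sorted_pairwise A (fun x => x)).imp (fun h => h)
  have hsbP : sb.Pairwise (· ≤ ·) :=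
    (PySem.List.sorted_pairwise B (fun x => x)).imp (fun h => h)
  have hN : (A.length : Int) = sa.length := by rw [hlsa]
  have hNb : (A.length : Int) ≤ sb.length := by rw [hlsb]; exact_mod_cast hpre
  have hpool : (sb.take A.length).Pairwise (· ≤ ·) :=
    hsbP.sublist (List.take_sublist A.length sb)
  have hpoollen : (sb.take A.length).length = A.length := by
    simp [List.length_take]; omega
  show loopA sa sb (A.length : Int) ((A.length : Int)).toNat 0 0 0
      = (A.length : Int) - ((sb.take A.length).foldl (stepB sa (A.length : Int)) (0, 0, 0)).2.2
  -- A's side: the greedy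
  rw [loopA_eq sa sb _ hN hNb _ 0 0 0 (by omega) le_rfl le_rfl (by positivity)]
  -- B's side: the sweep
  rw [foldB_eq hN hsaP (sb.take A.length) hpool 0 0 0 le_rfl
        (fun y _ => by positivity)]
  simp only [Int.toNat_zero, List.drop_zero, Int.toNat_natCast, zero_add]
  rw [fAsc_eq_Dd (sb.take A.length) sa hsaP hpool]
  have hmap : ((terms sa (sb.take A.length)).map (· + 0))
      = terms sa (sb.take A.length) := by
    rw [show ((· + 0) : Int → Int) = id by funext a; simp]
    exact List.map_id _
  rw [hmap, hpoollen]
  rfl
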